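-- pv_equiv track=rewrite | github.com/neksa/Descriptor_Preprocessor | src/ptr_file/pdb_list.py | adjust_motif_diagram
-- ===== SOURCE A (Python) =====
-- def adjust_motif_diagram(prev_map):
--     seq_motif_map = dict()
--     motif_len = 13
--     for pname, relative_motif_pos in prev_map.items():
--         abs_motif_pos = []
--         curr_count = 1
--         for i, pos in enumerate(relative_motif_pos):
--             if i == 0:
--                 abs_pos = pos + 1
--                 curr_count += pos
--                 curr_count += motif_len
--             else:
--                 abs_pos = curr_count + pos
--                 curr_count += pos
--                 curr_count += motif_len
--             abs_motif_pos.append(abs_pos)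
--         seq_motif_map[pname] = abs_motif_pos
--         assert len(relative_motif_pos) == len(abs_motif_pos)
--     return seq_motif_map
-- ===== SOURCE B (Python) =====
-- def adjust_motif_diagram(prev_map):
--     seq_motif_map = {}
--     for pname, relative_motif_pos in prev_map.items():
--         n = len(relative_motif_pos)
--         s = sum(relative_motif_pos)
--         rev = []
--         for i in range(n - 1, -1, -1):
--             rev.append(1 + 13 * i + s)
--             s -= relative_motif_pos[i]
--         seq_motif_map[pname] = rev[::-1]
--     return seq_motif_map
-- ===== Notes on version B (the rewrite author's own statement) =====
-- stated objective: alternative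
-- what changed: Instead of A's forward loop carrying a running counter (curr_count with an i==0 branch), B computes the total sum of each position list once and builds the result back-to-front: iterating indices from the last to the first, it emits the closed form 1 + 13*i + s and peels s down by subtracting positions, then reverses the collected list.
import Mathlib
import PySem

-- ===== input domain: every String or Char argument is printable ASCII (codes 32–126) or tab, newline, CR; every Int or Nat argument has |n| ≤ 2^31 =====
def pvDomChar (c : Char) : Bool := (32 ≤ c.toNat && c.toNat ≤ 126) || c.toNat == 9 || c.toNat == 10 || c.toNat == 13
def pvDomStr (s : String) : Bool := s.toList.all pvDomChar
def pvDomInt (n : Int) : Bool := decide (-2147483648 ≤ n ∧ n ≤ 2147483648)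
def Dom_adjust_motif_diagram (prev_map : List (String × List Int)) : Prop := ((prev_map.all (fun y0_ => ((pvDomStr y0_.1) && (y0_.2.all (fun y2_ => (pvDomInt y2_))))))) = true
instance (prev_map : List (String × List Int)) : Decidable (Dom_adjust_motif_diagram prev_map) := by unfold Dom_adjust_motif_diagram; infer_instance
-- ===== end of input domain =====

-- B replaces A's forward running-counter loop by a backwards pass: it takes the total
-- sum of the positions and walks indices last-to-first, emitting 1 + 13*i + s while
-- subtracting positions from s, then reverses (alternative decomposition, same cost).

-- ===== PORT A =====
-- A's inner loop body: state (abs_motif_pos, curr_count, i); branches on i == 0.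
def pvAstep (st : List Int × Int × Nat) (pos : Int) : List Int × Int × Nat :=
  let abs_pos := if st.2.2 = 0 then pos + 1 else st.2.1 + pos
  (st.1 ++ [abs_pos], st.2.1 + pos + 13, st.2.2 + 1)

def adjust_motif_diagram (prev_map : List (String × List Int)) : List (String × List Int) :=
  (prev_map.foldl (fun (seq_motif_map : PySem.Dict String (List Int)) pr =>
      seq_motif_map.insert pr.1 (pr.2.foldl pvAstep ([], 1, 0)).1)
    PySem.Dict.empty).items

-- ===== PORT B =====
-- B's backwards loop body over index i, with state (rev, s): append 1+13*i+s, subtract ps[i].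
-- Python's `range(n-1, -1, -1)` is ported as (List.range n).reverse (the same index
-- sequence n-1, …, 0); `relative_motif_pos[i]` with 0 ≤ i < n is ported as getD i 0.
def pvBstep (ps : List Int) (st : List Int × Int) (i : Nat) : List Int × Int :=
  (st.1 ++ [1 + 13 * (i : Int) + st.2], st.2 - ps.getD i 0)

def adjust_motif_diagram_alt (prev_map : List (String × List Int)) : List (String × List Int) :=
  (prev_map.foldl (fun (seq_motif_map : PySem.Dict String (List Int)) pr =>
      let rev := ((List.range pr.2.length).reverse.foldl (pvBstep pr.2) ([], pr.2.sum)).1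
      seq_motif_map.insert pr.1 rev.reverse)
    PySem.Dict.empty).items

-- ===== PRECONDITION & SPEC =====
def Spec_adjust_motif_diagram (prev_map : List (String × List Int)) (out : List (String × List Int)) : Prop := out = adjust_motif_diagram_alt prev_map
instance (prev_map : List (String × List Int)) (out : List (String × List Int)) : Decidable (Spec_adjust_motif_diagram prev_map out) := by unfold Spec_adjust_motif_diagram; infer_instance

-- ===== CLAIM (what is proved, stated in full; the proofs are below) =====
def Claim_equal_adjust_motif_diagram : Prop := ∀ (prev_map : List (String × List Int)), Dom_adjust_motif_diagram prev_map → Spec_adjust_motif_diagram prev_map (adjust_motif_diagram prev_map)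

-- ===== LEMMAS AND PROOFS =====

-- Closed form of A's inner computation (shifted absolute positions).
def pvG (l : List Int) (c : Int) : List Int :=
  match l with
  | [] => []
  | p :: t => (c + p) :: pvG t (c + p + 13)

-- Sum of the first k elements.
def pvPre (ps : List Int) (k : Nat) : Int := (ps.take k).sum

theorem pvA_inner (l : List Int) :
    ∀ (out : List Int) (c : Int) (i : Nat), i ≠ 0 →
    (l.foldl pvAstep (out, c, i)).1 = out ++ pvG l c := by
  induction l with
  | nil => intro out c i _; simp [pvG]
  | cons p t ih =>
    intro out c i hi
    simp only [List.foldl_cons, pvG, pvAstep, if_neg hi]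
    rw [ih (out ++ [c + p]) (c + p + 13) (i + 1) (by omega)]
    simp

theorem pvA_inner_fresh (l : List Int) :
    (l.foldl pvAstep ([], 1, 0)).1 = pvG l 1 := by
  cases l with
  | nil => simp [pvG]
  | cons p t =>
    simp only [List.foldl_cons]
    have h1 : pvAstep ([], 1, 0) p = ([p + 1], 1 + p + 13, 1) := by
      simp [pvAstep]
    rw [h1, pvA_inner t [p + 1] (1 + p + 13) 1 (by omega)]
    have h2 : (1 : Int) + p = p + 1 := by ring
    simp [pvG, h2]

theorem pvPre_succ (ps : List Int) (k : Nat) (hk : k < ps.length) :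
    pvPre ps (k + 1) = pvPre ps k + ps.getD k 0 := by
  unfold pvPre
  rw [List.take_add_one, List.sum_append, List.getD_eq_getElem?_getD]
  cases h : ps[k]? with
  | none => exact absurd (List.getElem?_eq_none_iff.mp h) (by omega)
  | some v => simp

-- B's backwards fold, characterized: starting from the k-prefix sum over indices k-1,…,0.
theorem pvB_inner (ps : List Int) :
    ∀ (k : Nat), k ≤ ps.length → ∀ (acc : List Int),
    (((List.range k).reverse.foldl (pvBstep ps) (acc, pvPre ps k))).1
    = acc ++ ((List.range k).map (fun (i : Nat) => 1 + 13 * (i : Int) + pvPre ps (i + 1))).reverse := by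
  intro k
  induction k with
  | zero => intro _ acc; simp
  | succ k ih =>
    intro hk acc
    rw [List.range_succ, List.reverse_append]
    simp only [List.reverse_singleton, List.singleton_append, List.foldl_cons]
    have hstep : pvBstep ps (acc, pvPre ps (k + 1)) k
        = (acc ++ [1 + 13 * (k : Int) + pvPre ps (k + 1)], pvPre ps k) := by
      simp [pvBstep, pvPre_succ ps k (by omega)]
    rw [hstep, ih (by omega)]
    simp

-- The two closed forms coincide: pvG from base 1 is exactly 1 + 13*i + prefix(i+1).
theorem pvG_eq_map (l : List Int) :
    ∀ (c0 : Int), pvG l (c0 + 1) =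
    (List.range l.length).map (fun (i : Nat) => c0 + 1 + 13 * (i : Int) + pvPre l (i + 1)) := by
  induction l with
  | nil => intro c0; simp [pvG]
  | cons p t ih =>
    intro c0
    simp only [pvG, List.length_cons, List.range_succ_eq_map, List.map_cons, List.map_map,
      List.cons.injEq]
    constructor
    · simp [pvPre]
    · have := ih (c0 + 13 + p)
      rw [show (c0 + 1 + p + 13) = (c0 + 13 + p) + 1 by ring, this]
      apply List.map_congr_left
      intro i _
      simp only [Function.comp_apply]
      have : pvPre (p :: t) (i + 1 + 1) = p + pvPre t (i + 1) := by
        simp [pvPre, List.take_succ_cons]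
      rw [this]
      push_cast
      ring

theorem pvInner_eq (l : List Int) :
    (((List.range l.length).reverse.foldl (pvBstep l) ([], l.sum)).1).reverse
    = (l.foldl pvAstep ([], 1, 0)).1 := by
  have hsum : l.sum = pvPre l l.length := by simp [pvPre]
  rw [pvA_inner_fresh, hsum, pvB_inner l l.length (le_refl _) []]
  have := pvG_eq_map l 0
  simp only [zero_add] at this
  simp [this]

-- ===== VERDICT (by name: the statement is the Claim_ definition above) =====
theorem adjust_motif_diagram_spec : Claim_equal_adjust_motif_diagram := by
  intro prev_map _
  show adjust_motif_diagram prev_map = adjust_motif_diagram_alt prev_map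
  unfold adjust_motif_diagram adjust_motif_diagram_alt
  simp only [pvInner_eq]
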